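-- pv_equiv track=rewrite | github.com/Sur818/Coding-Projects- | python programming/func88 mystry no range.py | mystry_no
-- ===== SOURCE A (Python) =====
-- def reverse(n):
-- 	n=str(n)
-- 	return int(n[::-1])
--
-- def mystry_no(n):
-- 	f=0
-- 	for i in range(1,n+1):
-- 		for j in range(1,n+1):
-- 			if i+j==n and reverse(i)==j:
-- 				f+=1
-- 				return True
-- 	if f==0:
-- 			return False
-- ===== SOURCE B (Python) =====
-- def reverse(n):
--     n = str(n)
--     return int(n[::-1])
--
-- def mystry_no(n):
--     return any(reverse(i) == n - i for i in range(1, n))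
-- ===== Notes on version B (the rewrite author's own statement) =====
-- stated objective: faster
-- what changed: Replaces the nested O(n^2) double loop with a single pass: for each i the only candidate partner is j = n - i, so B checks reverse(i) == n - i directly.
import Mathlib
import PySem

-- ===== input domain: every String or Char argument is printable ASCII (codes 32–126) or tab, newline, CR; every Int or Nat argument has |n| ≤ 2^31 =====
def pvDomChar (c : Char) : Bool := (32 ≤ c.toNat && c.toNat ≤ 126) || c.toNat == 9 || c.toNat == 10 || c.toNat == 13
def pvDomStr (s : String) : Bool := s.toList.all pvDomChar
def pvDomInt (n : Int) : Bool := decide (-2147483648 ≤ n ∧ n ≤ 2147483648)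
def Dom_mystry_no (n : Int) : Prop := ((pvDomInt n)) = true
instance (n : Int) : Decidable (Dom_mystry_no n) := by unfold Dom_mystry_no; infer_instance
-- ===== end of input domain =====

-- B replaces A's nested O(n^2) scan with a single loop checking reverse(i) == n-i (faster, asymptotic).


-- ===== PORT A =====
-- reverse(n) = int(str(n)[::-1]); in both programs it is only applied to i ≥ 1, where
-- int() always succeeds (reversed digit string), so the .getD 0 fallbacks are never hit.
def pyReverse (n : Int) : Int :=
  match PySem.Str.slice? (PySem.Int.toStr n) none none (-1) with
  | some s => (PySem.Int.ofStr? s).getD 0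
  | none => 0

def mystry_no (n : Int) : Bool :=
  (PySem.List.pyRange 1 (n + 1) 1).any (fun i =>
    (PySem.List.pyRange 1 (n + 1) 1).any (fun j =>
      i + j == n && pyReverse i == j))

-- ===== PORT B =====
def mystry_no_alt (n : Int) : Bool :=
  (PySem.List.pyRange 1 n 1).any (fun i => pyReverse i == n - i)

-- ===== PRECONDITION & SPEC =====
def Spec_mystry_no (n : Int) (out : Bool) : Prop := out = mystry_no_alt n
instance (n : Int) (out : Bool) : Decidable (Spec_mystry_no n out) := by unfold Spec_mystry_no; infer_instance

-- ===== CLAIM (what is proved, stated in full; the proofs are below) =====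
def Claim_equal_mystry_no : Prop := ∀ (n : Int), Dom_mystry_no n → Spec_mystry_no n (mystry_no n)

-- ===== LEMMAS AND PROOFS =====

-- ===== VERDICT (by name: the statement is the Claim_ definition above) =====
theorem mystry_no_spec : Claim_equal_mystry_no := by
  intro n _
  unfold Spec_mystry_no mystry_no mystry_no_alt
  rw [Bool.eq_iff_iff]
  simp only [List.any_eq_true, PySem.List.mem_pyRange_one, Bool.and_eq_true, beq_iff_eq]
  constructor
  · rintro ⟨i, ⟨h1, h2⟩, j, ⟨h3, h4⟩, hij, hrev⟩
    exact ⟨i, ⟨h1, by omega⟩, by omega⟩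
  · rintro ⟨i, ⟨h1, h2⟩, hrev⟩
    exact ⟨i, ⟨h1, by omega⟩, n - i, ⟨by omega, by omega⟩, by omega, by omega⟩
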